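-- pv_equiv track=rewrite | github.com/matthewbbone/cba-analysis | development/experiments/segmentation/llm_segment_v2/method.py | _trim_span_whitespace
-- ===== SOURCE A (Python) =====
-- def _trim_span_whitespace(text: str, start: int, end: int) -> tuple[int, int]:
--     start = max(0, min(start, len(text)))
--     end = max(start, min(end, len(text)))
--     while start < end and text[start].isspace():
--         start += 1
--     while end > start and text[end - 1].isspace():
--         end -= 1
--     return start, end
-- ===== SOURCE B (Python) =====
-- def _trim_span_whitespace(text: str, start: int, end: int) -> tuple[int, int]:
--     start = max(0, min(start, len(text)))
--     end = max(start, min(end, len(text)))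
--     span = text[start:end]
--     lstripped = span.lstrip()
--     new_start = start + (len(span) - len(lstripped))
--     new_end = new_start + len(lstripped.rstrip())
--     return new_start, new_end
-- ===== Notes on version B (the rewrite author's own statement) =====
-- stated objective: simpler
-- what changed: Replaces the two character-by-character while-loops over indices by taking the clamped slice and recovering the trimmed indices arithmetically from len() of lstrip()/rstrip() of that slice.
import Mathlib
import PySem

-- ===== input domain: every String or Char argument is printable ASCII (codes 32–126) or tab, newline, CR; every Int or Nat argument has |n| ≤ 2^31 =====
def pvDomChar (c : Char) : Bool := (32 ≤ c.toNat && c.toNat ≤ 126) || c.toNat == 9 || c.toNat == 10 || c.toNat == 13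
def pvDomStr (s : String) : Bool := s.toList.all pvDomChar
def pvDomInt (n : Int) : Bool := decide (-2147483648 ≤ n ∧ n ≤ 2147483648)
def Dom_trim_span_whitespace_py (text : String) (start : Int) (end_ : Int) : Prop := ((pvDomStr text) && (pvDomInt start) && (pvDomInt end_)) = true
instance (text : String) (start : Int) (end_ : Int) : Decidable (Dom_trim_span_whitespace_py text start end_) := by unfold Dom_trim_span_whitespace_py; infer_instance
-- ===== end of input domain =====

-- B replaces A's two index-walking while-loops by lstrip/rstrip on the clamped slice
-- plus index arithmetic; objective: simpler (same O(n) cost).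

-- ===== PORT A =====
-- while start < end and text[start].isspace(): start += 1
def pyTrimLeftA (text : String) (end_ : Int) (start : Int) : Int :=
  if _h : start < end_ then
    match PySem.Str.pyGet? text start with
    | some c => if PySem.Chars.isspace c then pyTrimLeftA text end_ (start + 1) else start
    | none => start   -- unreachable: A is only called with 0 ≤ start < end_ ≤ len(text)
  else start
termination_by (end_ - start).toNat
decreasing_by omega

-- while end > start and text[end - 1].isspace(): end -= 1
def pyTrimRightA (text : String) (start : Int) (end_ : Int) : Int :=
  if _h : end_ > start then
    match PySem.Str.pyGet? text (end_ - 1) with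
    | some c => if PySem.Chars.isspace c then pyTrimRightA text start (end_ - 1) else end_
    | none => end_   -- unreachable under the clamped bounds
  else end_
termination_by (end_ - start).toNat
decreasing_by omega

def trim_span_whitespace_py (text : String) (start : Int) (end_ : Int) : Int × Int :=
  let s := max 0 (min start (PySem.Str.len text))
  let e := max s (min end_ (PySem.Str.len text))
  let s' := pyTrimLeftA text e s
  let e' := pyTrimRightA text s' e
  (s', e')

-- ===== PORT B =====
def trim_span_whitespace_py_alt (text : String) (start : Int) (end_ : Int) : Int × Int :=
  let s := max 0 (min start (PySem.Str.len text))
  let e := max s (min end_ (PySem.Str.len text))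
  let span := PySem.Str.slice text (some s) (some e)
  let lstripped := PySem.Str.lstrip span
  let new_start := s + (PySem.Str.len span - PySem.Str.len lstripped)
  (new_start, new_start + PySem.Str.len (PySem.Str.rstrip lstripped))

-- ===== PRECONDITION & SPEC =====
def Spec_trim_span_whitespace_py (text : String) (start : Int) (end_ : Int) (out : Int × Int) : Prop := out = trim_span_whitespace_py_alt text start end_
instance (text : String) (start : Int) (end_ : Int) (out : Int × Int) : Decidable (Spec_trim_span_whitespace_py text start end_ out) := by unfold Spec_trim_span_whitespace_py; infer_instance

-- ===== CLAIM (what is proved, stated in full; the proofs are below) =====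
def Claim_equal_trim_span_whitespace_py : Prop := ∀ (text : String) (start : Int) (end_ : Int), Dom_trim_span_whitespace_py text start end_ → Spec_trim_span_whitespace_py text start end_ (trim_span_whitespace_py text start end_)

-- ===== LEMMAS AND PROOFS =====

theorem pyTrimLeftA_eq (text : String) (b : Nat) (hb : b ≤ text.toList.length) :
    ∀ a : Nat, a ≤ b →
      pyTrimLeftA text (b : Int) (a : Int)
        = (a : Int) + ((((text.toList.drop a).take (b - a)).takeWhile PySem.Chars.isspace).length : Int) := by
  suffices H : ∀ k a, a ≤ b → b - a = k →
      pyTrimLeftA text (b : Int) (a : Int)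
        = (a : Int) + ((((text.toList.drop a).take (b - a)).takeWhile PySem.Chars.isspace).length : Int) by
    intro a ha; exact H (b - a) a ha rfl
  intro k
  induction k with
  | zero =>
    intro a ha hk
    have hab : a = b := by omega
    rw [pyTrimLeftA]
    simp [hab]
  | succ k ih =>
    intro a ha hk
    have hlt : a < b := by omega
    have halen : a < text.toList.length := by omega
    rw [pyTrimLeftA]
    rw [dif_pos (by exact_mod_cast hlt)]
    have hget : PySem.Str.pyGet? text (a : Int) = some (text.toList[a]'halen) := by
      simp [List.getElem?_eq_getElem halen]
    simp only [hget]
    have hdrop : text.toList.drop a = text.toList[a]'halen :: text.toList.drop (a + 1) :=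
      (List.getElem_cons_drop halen).symm
    have hba : b - a = k + 1 := hk
    rw [hdrop, hba, List.take_succ_cons, List.takeWhile]
    by_cases hsp : PySem.Chars.isspace (text.toList[a]'halen)
    · rw [if_pos hsp, hsp]
      simp only []
      have : ((a : Int) + 1) = ((a + 1 : Nat) : Int) := by push_cast; ring
      rw [this, ih (a + 1) (by omega) (by omega)]
      have : b - (a + 1) = k := by omega
      rw [this]
      simp only [List.length_cons]
      push_cast; omega
    · rw [if_neg hsp]
      simp [hsp]

theorem pyTrimRightA_eq (text : String) (a : Nat) :
    ∀ b : Nat, a ≤ b → b ≤ text.toList.length →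
      pyTrimRightA text (a : Int) (b : Int)
        = (a : Int) + (((PySem.Chars.rstrip ((text.toList.drop a).take (b - a)))).length : Int) := by
  suffices H : ∀ k b, a ≤ b → b ≤ text.toList.length → b - a = k →
      pyTrimRightA text (a : Int) (b : Int)
        = (a : Int) + (((PySem.Chars.rstrip ((text.toList.drop a).take (b - a)))).length : Int) by
    intro b ha hb; exact H (b - a) b ha hb rfl
  intro k
  induction k with
  | zero =>
    intro b ha hb hk
    have hab : a = b := by omega
    rw [pyTrimRightA]
    simp [hab, PySem.Chars.rstrip]
  | succ k ih =>
    intro b ha hb hk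
    have hlt : a < b := by omega
    have hblen : b - 1 < text.toList.length := by omega
    rw [pyTrimRightA]
    rw [dif_pos (by exact_mod_cast hlt)]
    have hcast : (b : Int) - 1 = ((b - 1 : Nat) : Int) := by omega
    have hget : PySem.Str.pyGet? text ((b : Int) - 1) = some (text.toList[b-1]'hblen) := by
      rw [hcast]; simp [List.getElem?_eq_getElem hblen]
    simp only [hget]
    -- span = span' ++ [c]
    set c := text.toList[b-1]'hblen with hc
    have hspan : (text.toList.drop a).take (b - a)
        = (text.toList.drop a).take (b - 1 - a) ++ [c] := by
      have h1 : b - a = (b - 1 - a) + 1 := by omega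
      rw [h1, List.take_add_one]
      have h2 : (text.toList.drop a)[b - 1 - a]? = some c := by
        rw [List.getElem?_drop]
        have : a + (b - 1 - a) = b - 1 := by omega
        rw [this]
        exact List.getElem?_eq_getElem hblen
      rw [h2]; rfl
    by_cases hsp : PySem.Chars.isspace c
    · rw [if_pos hsp]
      rw [hcast, ih (b - 1) (by omega) (by omega) (by omega)]
      have : PySem.Chars.rstrip ((text.toList.drop a).take (b - a))
          = PySem.Chars.rstrip ((text.toList.drop a).take (b - 1 - a)) := by
        rw [hspan]
        simp [PySem.Chars.rstrip, hsp]
      rw [this]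
    · rw [if_neg hsp]
      have hfull : ((text.toList.drop a).take (b - a)).length = b - a := by
        rw [List.length_take, List.length_drop]; omega
      have : PySem.Chars.rstrip ((text.toList.drop a).take (b - a))
          = (text.toList.drop a).take (b - a) := by
        rw [hspan]
        simp [PySem.Chars.rstrip, hsp]
      rw [this, hfull]
      omega

-- dropWhile is drop of the takeWhile-length
theorem dropWhile_eq_drop_len {α : Type} (p : α → Bool) (l : List α) :
    l.dropWhile p = l.drop (l.takeWhile p).length := by
  induction l with
  | nil => rfl
  | cons x xs ih =>
    by_cases h : p x <;> simp [List.dropWhile, List.takeWhile, h, ih]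

-- ===== VERDICT (by name: the statement is the Claim_ definition above) =====
set_option maxHeartbeats 1000000 in
theorem trim_span_whitespace_py_spec : Claim_equal_trim_span_whitespace_py := by
  intro text start end_ _
  simp only [Spec_trim_span_whitespace_py, trim_span_whitespace_py, trim_span_whitespace_py_alt]
  set n : Int := PySem.Str.len text with hn
  have hnL : n = (text.toList.length : Int) := by rw [hn, PySem.Str.len_eq]
  set s : Int := max 0 (min start n) with hs
  set e : Int := max s (min end_ n) with he
  have hs0 : 0 ≤ s := by omega
  have hse : s ≤ e := by omega
  have hsn : s ≤ n := by omega
  have hen : e ≤ n := by omega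
  obtain ⟨a, ha⟩ : ∃ a : Nat, s = (a : Int) := ⟨s.toNat, (Int.toNat_of_nonneg hs0).symm⟩
  obtain ⟨b, hbb⟩ : ∃ b : Nat, e = (b : Int) := ⟨e.toNat, (Int.toNat_of_nonneg (le_trans hs0 hse)).symm⟩
  have hab : a ≤ b := by omega
  have hbL : b ≤ text.toList.length := by omega
  -- the clamped slice, as a list
  have hslice : (PySem.Str.slice text (some s) (some e)).toList
      = (text.toList.drop a).take (b - a) := by
    rw [PySem.Str.toList_slice, PySem.Chars.slice_eq_listSlice, ha, hbb,
        PySem.List.slice_natCast]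
  set span := (text.toList.drop a).take (b - a) with hspan
  set lead := (span.takeWhile PySem.Chars.isspace).length with hlead
  have hlen_span : span.length = b - a := by
    rw [hspan, List.length_take, List.length_drop]; omega
  have hlead_le : lead ≤ b - a := by
    have h := congrArg List.length (List.takeWhile_append_dropWhile (p := PySem.Chars.isspace) (l := span))
    rw [List.length_append] at h
    omega
  -- left side
  have hleft : pyTrimLeftA text e s = (a : Int) + (lead : Int) := by
    rw [ha, hbb]; exact pyTrimLeftA_eq text b hbL a hab
  -- lstrip of the slice
  have hlstrip : (PySem.Str.lstrip (PySem.Str.slice text (some s) (some e))).toList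
      = span.dropWhile PySem.Chars.isspace := by
    rw [PySem.Str.toList_lstrip, hslice]; rfl
  have hdw : span.dropWhile PySem.Chars.isspace = span.drop lead :=
    dropWhile_eq_drop_len _ _
  -- B's new_start equals A's trimmed start
  have hBstart : s + (PySem.Str.len (PySem.Str.slice text (some s) (some e))
      - PySem.Str.len (PySem.Str.lstrip (PySem.Str.slice text (some s) (some e))))
      = (a : Int) + (lead : Int) := by
    rw [PySem.Str.len_eq, PySem.Str.len_eq, hslice, hlstrip, hdw,
        List.length_drop, hlen_span, ha]
    omega
  -- the tail after the left trim
  have htail : (text.toList.drop (a + lead)).take (b - (a + lead)) = span.drop lead := by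
    rw [hspan, List.drop_take, List.drop_drop]
    have e1 : b - (a + lead) = b - a - lead := by omega
    rw [e1]
  -- right side
  have hright : pyTrimRightA text ((a : Int) + (lead : Int)) e
      = ((a + lead : Nat) : Int) + ((PySem.Chars.rstrip (span.drop lead)).length : Int) := by
    have h1 : (a : Int) + (lead : Int) = ((a + lead : Nat) : Int) := by push_cast; ring
    rw [h1, hbb, ← htail]
    exact pyTrimRightA_eq text (a + lead) b (by omega) hbL
  -- B's new_end
  have hBend : PySem.Str.len (PySem.Str.rstrip (PySem.Str.lstrip (PySem.Str.slice text (some s) (some e))))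
      = ((PySem.Chars.rstrip (span.drop lead)).length : Int) := by
    rw [PySem.Str.len_eq, PySem.Str.toList_rstrip, hlstrip, hdw]
  rw [hleft, hright, hBstart, hBend, Prod.mk.injEq]
  constructor <;> push_cast <;> ring
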